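-- pv_equiv track=rewrite | github.com/JamesHagerty1/LiveNotes-15-112-Spring-2020-Term-Project | Page.py | tailBlank
-- ===== SOURCE A (Python) =====
-- def tailBlank(text):
--     index = None
--     while index == None:
--         for i in range(len(text)-1, 0, -1):
--             if text[i] == ' ':
--                 index = i
--                 break
--         break
--     return index
-- ===== SOURCE B (Python) =====
-- def tailBlank(text):
--     index = None
--     for i in range(1, len(text)):
--         if text[i] == ' ':
--             index = i
--     return index
-- ===== Notes on version B (the rewrite author's own statement) =====
-- stated objective: simpler
-- what changed: Replaces A's backward scan wrapped in a dead while-loop (break on the first space found from the right) with a plain forward pass over range(1, len(text)) that keeps the index of the last space seen, returning it (or None).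
import Mathlib
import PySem

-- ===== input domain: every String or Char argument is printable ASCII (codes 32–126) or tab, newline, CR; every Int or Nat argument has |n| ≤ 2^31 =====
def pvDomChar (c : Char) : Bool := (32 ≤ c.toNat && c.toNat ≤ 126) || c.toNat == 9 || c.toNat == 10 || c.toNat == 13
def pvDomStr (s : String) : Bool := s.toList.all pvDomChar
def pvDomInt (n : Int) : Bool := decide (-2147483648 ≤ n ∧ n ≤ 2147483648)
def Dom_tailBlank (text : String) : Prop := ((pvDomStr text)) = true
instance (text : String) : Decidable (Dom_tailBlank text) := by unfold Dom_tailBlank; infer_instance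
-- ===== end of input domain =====

-- B replaces A's backward scan (break on first space from the right) with a forward
-- pass keeping the last space's index — a simpler decomposition, same return value.

-- ===== PORT A =====
-- A's for-loop over range(len(text)-1, 0, -1) with break: first i (from the right) with text[i] == ' '.
def tailBlankGoA (cs : List Char) : List Int → Option Int
  | [] => none
  | i :: rest =>
    if PySem.List.pyGet? cs i = some ' ' then some i else tailBlankGoA cs rest

def tailBlank (text : String) : Option Int :=
  let cs := text.toList
  tailBlankGoA cs (PySem.List.pyRange ((cs.length : Int) - 1) 0 (-1))

-- ===== PORT B =====
-- forward pass over range(1, len(text)) keeping the last match in the accumulator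
def tailBlank_alt (text : String) : Option Int :=
  let cs := text.toList
  (PySem.List.pyRange 1 (cs.length : Int) 1).foldl
    (fun acc i => if PySem.List.pyGet? cs i = some ' ' then some i else acc) none

-- ===== PRECONDITION & SPEC =====
def Spec_tailBlank (text : String) (out : Option Int) : Prop := out = tailBlank_alt text
instance (text : String) (out : Option Int) : Decidable (Spec_tailBlank text out) := by unfold Spec_tailBlank; infer_instance

-- ===== CLAIM (what is proved, stated in full; the proofs are below) =====
def Claim_equal_tailBlank : Prop := ∀ (text : String), Dom_tailBlank text → Spec_tailBlank text (tailBlank text)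

-- ===== LEMMAS AND PROOFS =====

-- A's first-match scan distributes over append.
theorem tailBlankGoA_append (cs : List Char) (xs ys : List Int) :
    tailBlankGoA cs (xs ++ ys) =
      (match tailBlankGoA cs xs with
       | some j => some j
       | none => tailBlankGoA cs ys) := by
  induction xs with
  | nil => simp [tailBlankGoA]
  | cons i rest ih =>
    by_cases h : PySem.List.pyGet? cs i = some ' ' <;>
      simp [tailBlankGoA, h, ih]

-- B's last-match fold equals A's first-match scan of the reversed index list.
theorem foldl_eq_goA_reverse (cs : List Char) (l : List Int) (a : Option Int) :
    l.foldl (fun acc i => if PySem.List.pyGet? cs i = some ' ' then some i else acc) a =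
      (match tailBlankGoA cs l.reverse with
       | some j => some j
       | none => a) := by
  induction l generalizing a with
  | nil => simp [tailBlankGoA]
  | cons i rest ih =>
    simp only [List.foldl_cons, List.reverse_cons, ih,
      tailBlankGoA_append]
    by_cases h : PySem.List.pyGet? cs i = some ' ' <;>
      cases htl : tailBlankGoA cs rest.reverse <;>
      simp [tailBlankGoA, h]

theorem tailBlank_eq_alt (text : String) : tailBlank text = tailBlank_alt text := by
  show tailBlankGoA text.toList (PySem.List.pyRange ((text.toList.length : Int) - 1) 0 (-1)) =
    (PySem.List.pyRange 1 (text.toList.length : Int) 1).foldl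
      (fun acc i => if PySem.List.pyGet? text.toList i = some ' ' then some i else acc) none
  have hrev : PySem.List.pyRange ((text.toList.length : Int) - 1) 0 (-1) =
      (PySem.List.pyRange 1 (text.toList.length : Int) 1).reverse := by
    have := PySem.List.pyRange_neg_one_eq_reverse ((text.toList.length : Int) - 1) 0
    simpa using this
  rw [foldl_eq_goA_reverse, hrev]
  cases tailBlankGoA text.toList ((PySem.List.pyRange 1 (text.toList.length : Int) 1).reverse) <;> simp

-- ===== VERDICT (by name: the statement is the Claim_ definition above) =====
theorem tailBlank_spec : Claim_equal_tailBlank := by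
  intro text _
  exact tailBlank_eq_alt text
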